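-- pv_equiv track=rewrite | github.com/Firpsik/MZI_Cripto | second_module.py | solve_mod_system
-- ===== SOURCE A (Python) =====
-- def mod_inverse(a, m):
--     g, x, _ = extended_gcd(a, m)
--     if g != 1:
--         raise ValueError(f'Нет обратного элемента для {a} по модулю {m}')
--     return x % m
--
-- def extended_gcd(a, b):
--     if a == 0:
--         return b, 0, 1
--     g, x1, y1 = extended_gcd(b % a, a)
--     x = y1 - (b // a) * x1
--     y = x1
--     return g, x, y
--
-- def solve_mod_equation(a, b, m):
--     g, _, _ = extended_gcd(a, m)
--     if b % g != 0:
--         raise ValueError(f'Нет решений для уравнения {a}x ≡ {b} (mod {m})')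
--     a_ = a // g
--     b_ = b // g
--     m_ = m // g
--     try:
--         x0 = (mod_inverse(a_, m_) * b_) % m_
--     except ValueError as e:
--         raise ValueError(f'Не удалось найти частное решение: {e}')
--     solutions = [(x0 + i * m_) % m for i in range(g)]
--     return solutions
--
-- def solve_mod_system(a, b, c, d, m):
--     delta_a = c - a
--     delta_b = d - b
--     try:
--         x_solutions = solve_mod_equation(delta_a, delta_b, m)
--     except ValueError as e:
--         raise ValueError(f'Не удалось найти решения для x: {e}')
--     y_solutions = [(x, (b - a * x) % m) for x in x_solutions]
--     return y_solutions
-- ===== SOURCE B (Python) =====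
-- def solve_mod_system(a, b, c, d, m):
--     # One-pass iterative solver: a single extended-gcd loop on (d-b ≡ (c-a)x mod m)
--     # yields both gcd and a Bezout coefficient; no recursion, no second gcd call.
--     da = c - a
--     db = d - b
--     old_r, r = m, da
--     old_s, s = 0, 1          # Bezout coefficient of da
--     while r != 0:
--         q = old_r // r
--         old_r, r = r, old_r - q * r
--         old_s, s = s, old_s - q * s
--     g, x = old_r, old_s
--     if db % g != 0:
--         raise ValueError(f'Не удалось найти решения для x: Нет решений для уравнения {da}x ≡ {db} (mod {m})')
--     mg = m // g
--     x0 = (x % mg * (db // g)) % mg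
--     out = []
--     for i in range(g):
--         xi = (x0 + i * mg) % m
--         out.append((xi, (b - a * xi) % m))
--     return out
-- ===== Notes on version B (the rewrite author's own statement) =====
-- stated objective: simpler
-- what changed: Replaced A's four-function cascade (recursive extended_gcd called twice, mod_inverse, solve_mod_equation with nested try/except and two list comprehensions) by one flat function with a single iterative extended-gcd loop whose Bezout coefficient is reused directly as the modular inverse, building the (x,y) pairs in one pass.
import Mathlib
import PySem

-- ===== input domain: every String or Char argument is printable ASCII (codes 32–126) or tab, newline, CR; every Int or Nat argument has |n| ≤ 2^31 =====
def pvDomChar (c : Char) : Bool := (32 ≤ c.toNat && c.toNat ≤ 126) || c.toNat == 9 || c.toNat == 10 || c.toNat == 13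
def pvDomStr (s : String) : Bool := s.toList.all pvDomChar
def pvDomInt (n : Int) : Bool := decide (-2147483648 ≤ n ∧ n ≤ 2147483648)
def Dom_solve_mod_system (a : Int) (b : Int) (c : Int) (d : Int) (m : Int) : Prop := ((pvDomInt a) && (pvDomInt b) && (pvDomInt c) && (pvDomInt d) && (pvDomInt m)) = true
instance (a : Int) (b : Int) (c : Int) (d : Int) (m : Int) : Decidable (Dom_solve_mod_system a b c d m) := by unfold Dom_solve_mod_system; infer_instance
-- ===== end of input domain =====

-- B replaces A's recursive extended_gcd / mod_inverse / solve_mod_equation cascade by one flat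
-- function with a single iterative extended-gcd loop whose Bezout coefficient is the inverse.
-- (Equivalence of the RETURN value on Pre_; both raise outside Pre_.)

-- termination helper for both gcd recursions: |b % a| < |a| for a ≠ 0 (Python mod)
theorem pv_mod_natAbs_lt (b a : Int) (h : a ≠ 0) : (PySem.Int.mod b a).natAbs < a.natAbs := by
  rcases lt_or_gt_of_ne h with hn | hp
  · have h1 := PySem.Int.mod_neg_bounds b hn
    omega
  · have h1 := PySem.Int.mod_nonneg b hp
    have h2 := PySem.Int.mod_lt b hp
    omega

-- ===== PORT A =====
-- extended_gcd(a, b) — recursive, exactly as in the Python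
def egcdA (a b : Int) : Int × Int × Int :=
  if a = 0 then (b, 0, 1)
  else
    let p := egcdA (PySem.Int.mod b a) a
    (p.1, p.2.2 - (PySem.Int.floordiv b a) * p.2.1, p.2.1)
termination_by a.natAbs
decreasing_by exact pv_mod_natAbs_lt b a (by assumption)

-- mod_inverse(a, m): none = the ValueError branch
def modInverseA (a m : Int) : Option Int :=
  let p := egcdA a m
  if p.1 ≠ 1 then none else some (PySem.Int.mod p.2.1 m)

-- solve_mod_equation(a, b, m): none = a ValueError
def solveModEquationA (a b m : Int) : Option (List Int) :=
  let p := egcdA a m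
  let g := p.1
  if PySem.Int.mod b g ≠ 0 then none
  else
    let a_ := PySem.Int.floordiv a g
    let b_ := PySem.Int.floordiv b g
    let m_ := PySem.Int.floordiv m g
    match modInverseA a_ m_ with
    | none => none
    | some inv =>
      let x0 := PySem.Int.mod (inv * b_) m_
      some ((PySem.List.pyRange 0 g 1).map (fun i => PySem.Int.mod (x0 + i * m_) m))

def solve_mod_system (a : Int) (b : Int) (c : Int) (d : Int) (m : Int) : List (Int × Int) :=
  let delta_a := c - a
  let delta_b := d - b
  match solveModEquationA delta_a delta_b m with
  | none => []   -- the re-raised ValueError; outside Pre_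
  | some xs => xs.map (fun x => (x, PySem.Int.mod (b - a * x) m))

-- ===== PORT B =====
-- the iterative extended-gcd loop of Source B: state (old_r, r, old_s, s); returns (old_r, old_s)
def egcdLoopB (old_r r old_s s : Int) : Int × Int :=
  if r = 0 then (old_r, old_s)
  else
    let q := PySem.Int.floordiv old_r r
    egcdLoopB r (old_r - q * r) s (old_s - q * s)
termination_by r.natAbs
decreasing_by
  have : old_r - PySem.Int.floordiv old_r r * r = PySem.Int.mod old_r r := by
    have := PySem.Int.floordiv_mul_add_mod old_r r
    linarith
  rw [this]
  exact pv_mod_natAbs_lt old_r r (by assumption)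

def solve_mod_system_alt (a : Int) (b : Int) (c : Int) (d : Int) (m : Int) : List (Int × Int) :=
  let da := c - a
  let db := d - b
  let p := egcdLoopB m da 0 1
  let g := p.1
  let x := p.2
  if PySem.Int.mod db g ≠ 0 then []   -- Source B raises ValueError here; outside Pre_
  else
    let mg := PySem.Int.floordiv m g
    let x0 := PySem.Int.mod (PySem.Int.mod x mg * PySem.Int.floordiv db g) mg
    (PySem.List.pyRange 0 g 1).map (fun i =>
      let xi := PySem.Int.mod (x0 + i * mg) m
      (xi, PySem.Int.mod (b - a * xi) m))

-- ===== PRECONDITION & SPEC =====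
-- Pre_ excludes exactly the inputs where A raises: m = 0 (ZeroDivisionError) and
-- gcd(c-a, m) not dividing d-b (ValueError); B raises on exactly the same inputs.
def Pre_solve_mod_system (a : Int) (b : Int) (c : Int) (d : Int) (m : Int) : Prop :=
  m ≠ 0 ∧ ((Int.gcd (c - a) m : Int)) ∣ (d - b)
instance (a : Int) (b : Int) (c : Int) (d : Int) (m : Int) : Decidable (Pre_solve_mod_system a b c d m) := by unfold Pre_solve_mod_system; infer_instance

def pvWitness_solve_mod_system : Int × Int × Int × Int × Int := (0, 0, 1, 1, 3)

def Spec_solve_mod_system (a : Int) (b : Int) (c : Int) (d : Int) (m : Int) (out : List (Int × Int)) : Prop := out = solve_mod_system_alt a b c d m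
instance (a : Int) (b : Int) (c : Int) (d : Int) (m : Int) (out : List (Int × Int)) : Decidable (Spec_solve_mod_system a b c d m out) := by unfold Spec_solve_mod_system; infer_instance

-- ===== CLAIM (what is proved, stated in full; the proofs are below) =====
def Claim_equal_solve_mod_system : Prop := ∀ (a : Int) (b : Int) (c : Int) (d : Int) (m : Int), Dom_solve_mod_system a b c d m → Pre_solve_mod_system a b c d m → Spec_solve_mod_system a b c d m (solve_mod_system a b c d m)


-- ===== LEMMAS AND PROOFS =====

theorem pv_egcdA_zero (b : Int) : egcdA 0 b = (b, 0, 1) := by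
  rw [egcdA]; simp

-- B's loop, started from (b, a, u, v), computes A's recursive gcd of (a, b) and the
-- (v, u)-combination of its Bezout coefficients.
theorem pv_egcd_pair (n : Nat) : ∀ (a b u v : Int), a.natAbs = n →
    egcdLoopB b a u v =
      ((egcdA a b).1, v * (egcdA a b).2.1 + u * (egcdA a b).2.2) := by
  induction n using Nat.strong_induction_on with
  | _ n IH =>
    intro a b u v hn
    by_cases h : a = 0
    · subst h
      rw [egcdLoopB, pv_egcdA_zero]
      simp
    · have hmod : b - PySem.Int.floordiv b a * a = PySem.Int.mod b a := by
        have := PySem.Int.floordiv_mul_add_mod b a; linarith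
      have hlt : (PySem.Int.mod b a).natAbs < n := hn ▸ pv_mod_natAbs_lt b a h
      have hrec := IH (PySem.Int.mod b a).natAbs hlt (PySem.Int.mod b a) a v
        (u - PySem.Int.floordiv b a * v) rfl
      rw [egcdLoopB]
      simp only [if_neg h]
      rw [hmod, hrec]
      rcases hp : egcdA (PySem.Int.mod b a) a with ⟨g, x1, y1⟩
      rw [egcdA]
      simp only [if_neg h, hp]
      simp only [Prod.mk.injEq]
      exact ⟨by trivial, by ring⟩

-- Bezout identity, divisibility and sign facts about A's recursive gcd
theorem pv_egcdA_spec (n : Nat) : ∀ (a b : Int), a.natAbs = n →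
    a * (egcdA a b).2.1 + b * (egcdA a b).2.2 = (egcdA a b).1 ∧
    (egcdA a b).1 ∣ a ∧ (egcdA a b).1 ∣ b ∧
    (0 < a → 0 < (egcdA a b).1) ∧ (a < 0 → (egcdA a b).1 < 0) := by
  induction n using Nat.strong_induction_on with
  | _ n IH =>
    intro a b hn
    by_cases h : a = 0
    · subst h
      rw [pv_egcdA_zero]
      exact ⟨by ring, dvd_zero b, dvd_refl b, by omega, by omega⟩
    · have hlt : (PySem.Int.mod b a).natAbs < n := hn ▸ pv_mod_natAbs_lt b a h
      have ih := IH (PySem.Int.mod b a).natAbs hlt (PySem.Int.mod b a) a rfl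
      rcases hp : egcdA (PySem.Int.mod b a) a with ⟨g, x1, y1⟩
      rw [hp] at ih
      obtain ⟨ih1, ih2, ih3, ih4, ih5⟩ := ih
      simp only at ih1 ih2 ih3 ih4 ih5
      have hb : PySem.Int.floordiv b a * a + PySem.Int.mod b a = b :=
        PySem.Int.floordiv_mul_add_mod b a
      rw [egcdA]
      simp only [if_neg h, hp]
      refine ⟨by linear_combination ih1 - x1 * hb, ih3, ?_, ?_, ?_⟩
      · rw [← hb]; exact dvd_add (ih3.mul_left _) ih2
      · intro ha
        have h0 := PySem.Int.mod_nonneg b ha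
        rcases h0.lt_or_eq with hpos | hzero
        · exact ih4 hpos
        · rw [← hzero, pv_egcdA_zero] at hp
          have : a = g := congrArg Prod.fst hp
          omega
      · intro ha
        have h0 := (PySem.Int.mod_neg_bounds b ha).2
        rcases h0.lt_or_eq with hneg | hzero
        · exact ih5 hneg
        · rw [hzero, pv_egcdA_zero] at hp
          have : a = g := congrArg Prod.fst hp
          omega

theorem pv_floordiv_exact (g a : Int) (h : g ∣ a) : g * PySem.Int.floordiv a g = a := by
  have h1 := PySem.Int.floordiv_mul_add_mod a g
  have h2 := (PySem.Int.mod_eq_zero_iff_dvd a g).mpr h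
  rw [mul_comm]; linarith

-- Python's % is constant on residue classes of a nonzero modulus
theorem pv_mod_congr (x y n : Int) (hn : n ≠ 0) (h : n ∣ (x - y)) :
    PySem.Int.mod x n = PySem.Int.mod y n := by
  have e1 := PySem.Int.floordiv_mul_add_mod x n
  have e2 := PySem.Int.floordiv_mul_add_mod y n
  have hd : n ∣ (PySem.Int.mod x n - PySem.Int.mod y n) := by
    have heq : PySem.Int.mod x n - PySem.Int.mod y n =
        (x - y) - (PySem.Int.floordiv x n - PySem.Int.floordiv y n) * n := by
      linear_combination e1 - e2
    rw [heq]
    exact dvd_sub h ⟨PySem.Int.floordiv x n - PySem.Int.floordiv y n, by ring⟩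
  obtain ⟨k, hk⟩ := hd
  have hk0 : k = 0 := by
    rcases lt_or_gt_of_ne hn with hneg | hpos
    · have b1 := PySem.Int.mod_neg_bounds x hneg
      have b2 := PySem.Int.mod_neg_bounds y hneg
      by_contra h0
      rcases lt_or_gt_of_ne h0 with hkneg | hkpos
      · have h2 : n * (-1) ≤ n * k := mul_le_mul_of_nonpos_left (by omega) (le_of_lt hneg)
        have h3 : n * (-1) = -n := by ring
        linarith
      · have h2 : n * k ≤ n * 1 := mul_le_mul_of_nonpos_left (by omega) (le_of_lt hneg)
        have h3 : n * 1 = n := by ring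
        linarith
    · have b1 := PySem.Int.mod_nonneg x hpos
      have b1' := PySem.Int.mod_lt x hpos
      have b2 := PySem.Int.mod_nonneg y hpos
      have b2' := PySem.Int.mod_lt y hpos
      by_contra h0
      rcases lt_or_gt_of_ne h0 with hkneg | hkpos
      · have h2 : n * k ≤ n * (-1) := mul_le_mul_of_nonneg_left (by omega) (le_of_lt hpos)
        have h3 : n * (-1) = -n := by ring
        linarith
      · have h2 : n * 1 ≤ n * k := mul_le_mul_of_nonneg_left (by omega) (le_of_lt hpos)
        have h3 : n * 1 = n := by ring
        linarith
  rw [hk0, mul_zero] at hk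
  linarith

-- ===== VERDICT (by name: the statement is the Claim_ definition above) =====
theorem solve_mod_system_spec : Claim_equal_solve_mod_system := by
  intro a b c d m _ hpre
  obtain ⟨hm, hdvd⟩ := hpre
  unfold Spec_solve_mod_system solve_mod_system solve_mod_system_alt
  rcases hE : egcdA (c - a) m with ⟨g, x, y⟩
  have hspec := pv_egcdA_spec (c - a).natAbs (c - a) m rfl
  rw [hE] at hspec
  obtain ⟨hbez, hgda, hgm, hpos, hneg⟩ := hspec
  simp only at hbez hgda hgm hpos hneg
  -- the divisibility test passes on both sides
  have hgdb : g ∣ (d - b) := by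
    have h1 : g.natAbs ∣ Int.gcd (c - a) m := by
      unfold Int.gcd
      exact Nat.dvd_gcd (Int.natAbs_dvd_natAbs.mpr hgda) (Int.natAbs_dvd_natAbs.mpr hgm)
    exact dvd_trans (Int.natAbs_dvd.mp (Int.natCast_dvd_natCast.mpr h1)) hdvd
  have hc : PySem.Int.mod (d - b) g = 0 := (PySem.Int.mod_eq_zero_iff_dvd _ _).mpr hgdb
  have hg0 : g ≠ 0 := by
    intro h0; rw [h0] at hgm; exact hm (zero_dvd_iff.mp hgm)
  -- exact divisions
  have hda_eq : g * PySem.Int.floordiv (c - a) g = c - a := pv_floordiv_exact g _ hgda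
  have hm_eq : g * PySem.Int.floordiv m g = m := pv_floordiv_exact g _ hgm
  set a_ := PySem.Int.floordiv (c - a) g with ha_
  set b_ := PySem.Int.floordiv (d - b) g with hb_
  set m_ := PySem.Int.floordiv m g with hm_
  have hm_ne : m_ ≠ 0 := by
    intro h0; rw [h0, mul_zero] at hm_eq; exact hm hm_eq.symm
  have hbez1 : a_ * x + m_ * y = 1 := by
    have hgg : g * (a_ * x + m_ * y) = g * 1 := by
      rw [mul_one]
      calc g * (a_ * x + m_ * y) = (g * a_) * x + (g * m_) * y := by ring
        _ = (c - a) * x + m * y := by rw [hda_eq, hm_eq]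
        _ = g := hbez
    exact mul_left_cancel₀ hg0 hgg
  -- the inner gcd of A's mod_inverse
  rcases hE2 : egcdA a_ m_ with ⟨g', x', y'⟩
  have hspec2 := pv_egcdA_spec a_.natAbs a_ m_ rfl
  rw [hE2] at hspec2
  obtain ⟨hbez2, hga', hgm', hpos2, _⟩ := hspec2
  simp only at hbez2 hga' hgm' hpos2
  have hg'dvd1 : g' ∣ 1 := by
    have hdd : g' ∣ a_ * x + m_ * y := dvd_add (hga'.mul_right x) (hgm'.mul_right y)
    rwa [hbez1] at hdd
  have hg'1 : g' = 1 := by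
    by_cases hda0 : c - a = 0
    · -- delta_a = 0: g = m, a_ = 0, m_ = 1, and egcdA 0 1 = (1, 0, 1)
      have ha0 : a_ = 0 := by
        have := hda_eq; rw [hda0] at this
        rcases mul_eq_zero.mp this with h' | h'
        · exact absurd h' hg0
        · exact h'
      have hm1 : m_ = 1 := by
        have hgmm : g = m := by
          rw [hda0, pv_egcdA_zero] at hE
          exact (congrArg Prod.fst hE).symm
        rw [hgmm] at hm_eq
        have h2 : g * m_ = g * 1 := by rw [mul_one, hgmm]; exact hm_eq
        exact mul_left_cancel₀ hg0 h2
      rw [ha0, hm1, pv_egcdA_zero] at hE2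
      exact (congrArg Prod.fst hE2).symm
    · have ha_pos : 0 < a_ := by
        rcases lt_or_gt_of_ne hda0 with h' | h'
        · have hgneg := hneg h'; nlinarith [hda_eq]
        · have hgpos := hpos h'; nlinarith [hda_eq]
      have hg'pos : 0 < g' := hpos2 ha_pos
      rcases Int.isUnit_iff.mp (isUnit_of_dvd_one hg'dvd1) with h' | h' <;> omega
  -- the two canonical inverses coincide
  have hxx : PySem.Int.mod x m_ = PySem.Int.mod x' m_ := by
    apply pv_mod_congr _ _ _ hm_ne
    have hbez2' : a_ * x' + m_ * y' = 1 := by rw [hbez2, hg'1]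
    have hma : m_ ∣ a_ * (x - x') := ⟨y' - y, by linear_combination hbez1 - hbez2'⟩
    have hco : IsCoprime m_ a_ := ⟨y, x, by linear_combination hbez1⟩
    exact hco.dvd_of_dvd_mul_left hma
  -- both sides reduce to the same list
  have hB : egcdLoopB m (c - a) 0 1 = (g, x) := by
    rw [pv_egcd_pair (c - a).natAbs (c - a) m 0 1 rfl, hE]
    simp
  simp only [solveModEquationA, modInverseA, hE, hB, hc]
  simp only [← ha_, ← hb_, ← hm_]
  simp only [hE2, hg'1, hxx]
  simp [List.map_map, Function.comp]
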